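-- pv_equiv track=rewrite | github.com/tmoertel/practice | google-code-jam/2009/round-1C-A-all-your-base/all_your_base.py | solve
-- ===== SOURCE A (Python) =====
-- def solve(message):
--     base = max(2, len(set(message)))  # select the least possible base
--     digit_sched = [1, 0] + list(range(2, base + 1))  # lowest-possible first
--     symbol_vals = {}
--     total = 0
--     for s in message:
--         total *= base
--         total += symbol_vals.setdefault(s, digit_sched[len(symbol_vals)])
--     return total
-- ===== SOURCE B (Python) =====
-- def solve(message):
--     # one pass to build the symbol table, then a separate back-to-front evaluation pass
--     order = list(dict.fromkeys(message))
--     base = max(2, len(order))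
--     vals = {s: (1 if k == 0 else 0 if k == 1 else k) for k, s in enumerate(order)}
--     total = 0
--     power = 1
--     for s in reversed(message):
--         total += vals[s] * power
--         power *= base
--     return total
-- ===== Notes on version B (the rewrite author's own statement) =====
-- stated objective: alternative
-- what changed: A interleaves symbol-table construction (dict.setdefault with a digit_sched list) with most-significant-first Horner accumulation in one loop; B first builds the complete symbol->digit table from the first-appearance order in a separate pass, then evaluates the number back-to-front over reversed(message) with a running power accumulator.
import Mathlib
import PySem

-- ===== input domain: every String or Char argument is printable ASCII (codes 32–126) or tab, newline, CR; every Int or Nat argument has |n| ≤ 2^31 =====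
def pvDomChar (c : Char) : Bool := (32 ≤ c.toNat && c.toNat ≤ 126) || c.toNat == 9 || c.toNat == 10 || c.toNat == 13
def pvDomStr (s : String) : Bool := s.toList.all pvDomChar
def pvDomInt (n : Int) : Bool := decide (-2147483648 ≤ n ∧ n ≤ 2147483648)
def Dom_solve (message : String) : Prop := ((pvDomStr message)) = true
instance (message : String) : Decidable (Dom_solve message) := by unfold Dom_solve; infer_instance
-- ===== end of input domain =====

-- B separates table construction (first-appearance order, digit schedule 1,0,2,3,…) from a
-- back-to-front running-power evaluation pass, replacing A's interleaved setdefault/Horner loop (objective: alternative).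

-- ===== PORT A =====
-- literal port of A: Horner accumulation with symbol_vals.setdefault interleaved.
-- digit_sched[len(symbol_vals)] is always in range (len(symbol_vals) ≤ base < len(digit_sched) = base+1),
-- so pyGetD's default 0 is never produced (Python never raises here).
def solve (message : String) : Int :=
  let cs := message.toList
  let base : Int := max 2 ((PySem.Set.ofList cs).length : Int)
  let digit_sched : List Int := [1, 0] ++ PySem.List.pyRange 2 (base + 1)
  (cs.foldl
    (fun (st : PySem.Dict Char Int × Int) s =>
      (st.1.setdefault s (PySem.List.pyGetD digit_sched (st.1.size : Int) 0),
       st.2 * base + st.1.getD s (PySem.List.pyGetD digit_sched (st.1.size : Int) 0)))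
    (PySem.Dict.empty, 0)).2

-- ===== PORT B =====
-- 1 if k == 0 else 0 if k == 1 else k
def schedVal (k : Int) : Int := if k = 0 then 1 else if k = 1 then 0 else k

-- vals[s] is always present (every char of message is in order), so getD's default 0 is never produced.
def solve_alt (message : String) : Int :=
  let cs := message.toList
  let order := PySem.List.dedup cs
  let base : Int := max 2 (order.length : Int)
  let vals : PySem.Dict Char Int :=
    (PySem.List.enumerate order).foldl (fun d q => d.insert q.2 (schedVal q.1)) PySem.Dict.empty
  (cs.reverse.foldl (fun (st : Int × Int) s => (st.1 + vals.getD s 0 * st.2, st.2 * base)) (0, 1)).1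

-- ===== PRECONDITION & SPEC =====
def Spec_solve (message : String) (out : Int) : Prop := out = solve_alt message
instance (message : String) (out : Int) : Decidable (Spec_solve message out) := by unfold Spec_solve; infer_instance

-- ===== CLAIM (what is proved, stated in full; the proofs are below) =====
def Claim_equal_solve : Prop := ∀ (message : String), Dom_solve message → Spec_solve message (solve message)

-- ===== LEMMAS AND PROOFS =====

-- proof-side abbreviations (data of a given message, named so the lemmas can quantify over prefixes)
def baseOf (cs : List Char) : Int := max 2 ((PySem.Set.ofList cs).length : Int)

def schedListOf (cs : List Char) : List Int := [1, 0] ++ PySem.List.pyRange 2 (baseOf cs + 1)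

-- the digit value a symbol ends up with, determined by first-appearance order in the whole message
def dv (cs : List Char) (c : Char) : Int := schedVal (List.idxOf c (PySem.Set.ofList cs) : Int)

-- B's symbol table, as a function of the (deduplicated) key list
def dictOf (xs : List Char) : PySem.Dict Char Int :=
  (PySem.List.enumerate xs).foldl (fun d q => d.insert q.2 (schedVal q.1)) PySem.Dict.empty

theorem items_dictOf (xs : List Char) (h : xs.Nodup) :
    (dictOf xs).items = (PySem.List.enumerate xs).map (fun q => (q.2, schedVal q.1)) := by
  unfold dictOf
  rw [PySem.Dict.items_foldl_insert_fresh (PySem.List.enumerate xs) (·.2) (fun q => schedVal q.1)]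
  · simp [PySem.Dict.empty]
  · intro a _; simp
  · rw [show (fun q : Int × Char => q.2) = Prod.snd from rfl, PySem.List.map_snd_enumerate]; exact h

theorem keys_dictOf (xs : List Char) (h : xs.Nodup) : (dictOf xs).keys = xs := by
  simp only [PySem.Dict.keys, items_dictOf xs h, List.map_map]
  rw [show ((fun p : Char × Int => p.1) ∘ fun q : Int × Char => (q.2, schedVal q.1)) = Prod.snd from rfl,
    PySem.List.map_snd_enumerate]

theorem size_dictOf (xs : List Char) (h : xs.Nodup) : (dictOf xs).size = xs.length := by
  simp [PySem.Dict.size, items_dictOf xs h, PySem.List.length_enumerate]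

theorem getD_dictOf (xs : List Char) (h : xs.Nodup) (c : Char) (hc : c ∈ xs) (d0 : Int) :
    (dictOf xs).getD c d0 = schedVal (List.idxOf c xs : Int) := by
  apply PySem.Dict.getD_of_mem_items
  · rw [items_dictOf xs h]
    have hlt : List.idxOf c xs < xs.length := List.idxOf_lt_length_of_mem hc
    have : ((List.idxOf c xs : Int), c) ∈ PySem.List.enumerate xs := by
      rw [PySem.List.mem_enumerate_iff]
      exact ⟨List.idxOf c xs, hlt, by simp⟩
    have := List.mem_map_of_mem (f := fun q : Int × Char => (q.2, schedVal q.1)) this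
    simpa using this
  · rw [keys_dictOf xs h]; exact h

theorem dictOf_append_singleton (xs : List Char) (c : Char) :
    dictOf (xs ++ [c]) = (dictOf xs).insert c (schedVal (xs.length : Int)) := by
  unfold dictOf
  rw [PySem.List.enumerate_append, List.foldl_append]
  simp [PySem.List.enumerate_cons, PySem.List.enumerate_nil]

theorem ofList_append_singleton (p : List Char) (c : Char) :
    PySem.Set.ofList (p ++ [c]) =
      if c ∈ PySem.Set.ofList p then PySem.Set.ofList p else PySem.Set.ofList p ++ [c] := by
  rw [PySem.Set.ofList_eq_foldl, List.foldl_append, ← PySem.Set.ofList_eq_foldl]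
  simp [PySem.Set.add, PySem.Set.contains]

-- deduplicating an extended list only appends new symbols at the end
theorem ofList_append_exists (p q : List Char) :
    ∃ t, PySem.Set.ofList (p ++ q) = PySem.Set.ofList p ++ t := by
  induction q using List.reverseRecOn with
  | nil => exact ⟨[], by simp⟩
  | append_singleton q c ih =>
    obtain ⟨t, ht⟩ := ih
    rw [← List.append_assoc, ofList_append_singleton]
    split
    · exact ⟨t, ht⟩
    · exact ⟨t ++ [c], by rw [ht, List.append_assoc]⟩

theorem pyRange_getD (j : Nat) : ∀ (a b : Int), (a + j) < b → (PySem.List.pyRange a b).getD j 0 = a + j := by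
  induction j with
  | zero => intro a b h; rw [PySem.List.pyRange_one_cons (by omega)]; simp
  | succ j ih =>
    intro a b h
    rw [PySem.List.pyRange_one_cons (by omega)]
    have h2 := ih (a + 1) b (by omega)
    rw [List.getD_cons_succ, h2]
    push_cast; ring

-- A's digit_sched agrees with B's schedule formula at every reachable index
theorem schedList_getD (cs : List Char) (k : Nat) (hk : (k : Int) < baseOf cs + 1) :
    PySem.List.pyGetD (schedListOf cs) (k : Int) 0 = schedVal (k : Int) := by
  rw [PySem.List.pyGetD_natCast]
  unfold schedListOf schedVal
  match k with
  | 0 => simp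
  | 1 => simp
  | (j+2) =>
    have h1 : ((j : Int) + 2) < baseOf cs + 1 := by push_cast at hk ⊢; omega
    have := pyRange_getD j 2 (baseOf cs + 1) (by omega)
    rw [show ([1, 0] ++ PySem.List.pyRange 2 (baseOf cs + 1)) = 1 :: 0 :: PySem.List.pyRange 2 (baseOf cs + 1) from rfl,
      List.getD_cons_succ, List.getD_cons_succ, this]
    have e0 : ¬((((j + 2 : Nat)) : Int) = 0) := by push_cast; omega
    have e1 : ¬((((j + 2 : Nat)) : Int) = 1) := by push_cast; omega
    rw [if_neg e0, if_neg e1]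
    push_cast; ring

-- B's running-power loop computes acc + p * (least-significant-first value)
theorem rev_loop (f : Char → Int) (base : Int) :
    ∀ (l : List Char) (acc p : Int),
      (l.foldl (fun (st : Int × Int) s => (st.1 + f s * st.2, st.2 * base)) (acc, p)).1
        = acc + p * l.foldr (fun c v => f c + v * base) 0 := by
  intro l
  induction l with
  | nil => intro acc p; simp
  | cons s t ih =>
    intro acc p
    rw [List.foldl_cons, List.foldr_cons, ih]
    ring

-- A's Horner loop over l = least-significant-first value of l.reverse
theorem horner_eq_rev (f : Char → Int) (base : Int) (l : List Char) :
    l.foldl (fun t c => t * base + f c) 0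
      = l.reverse.foldr (fun c v => f c + v * base) 0 := by
  rw [List.foldr_reverse]
  have : (fun (v : Int) (c : Char) => f c + v * base) = fun t c => t * base + f c := by
    funext v c; ring
  rw [this]

-- A's loop: the dict state over a prefix p is B's table for the deduped prefix, and each
-- step adds exactly the whole-message digit value dv
theorem A_loop (cs : List Char) :
    ∀ (rest p : List Char) (t : Int), p ++ rest = cs →
      (rest.foldl
        (fun (st : PySem.Dict Char Int × Int) s =>
          (st.1.setdefault s (PySem.List.pyGetD (schedListOf cs) (st.1.size : Int) 0),
           st.2 * baseOf cs + st.1.getD s (PySem.List.pyGetD (schedListOf cs) (st.1.size : Int) 0)))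
        (dictOf (PySem.Set.ofList p), t)).2
      = rest.foldl (fun acc c => acc * baseOf cs + dv cs c) t := by
  intro rest
  induction rest with
  | nil => intro p t _; rfl
  | cons c rest' ih =>
    intro p t hcs
    have hD : (PySem.Set.ofList p).Nodup := PySem.Set.nodup_ofList p
    set D := PySem.Set.ofList p with hDdef
    have hsize : (dictOf D).size = D.length := size_dictOf D hD
    have hkeys : (dictOf D).keys = D := keys_dictOf D hD
    obtain ⟨t0, ht0⟩ := ofList_append_exists p (c :: rest')
    rw [hcs] at ht0
    have hlen : (D.length : Int) < baseOf cs + 1 := by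
      have : D.length ≤ (PySem.Set.ofList cs).length := by rw [ht0, hDdef]; simp
      unfold baseOf; omega
    rw [List.foldl_cons, List.foldl_cons]
    by_cases hc : c ∈ D
    · -- seen before: dict unchanged, value is its stored digit
      have hcont : (dictOf D).contains c = true := by
        rw [PySem.Dict.contains_eq_decide_mem_keys, hkeys]; simpa using hc
      have hsd : (dictOf D).setdefault c (PySem.List.pyGetD (schedListOf cs) ((dictOf D).size : Int) 0)
          = dictOf D := by simp [PySem.Dict.setdefault, hcont]
      have hget : (dictOf D).getD c (PySem.List.pyGetD (schedListOf cs) ((dictOf D).size : Int) 0)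
          = dv cs c := by
        rw [getD_dictOf D hD c hc]
        unfold dv
        rw [ht0, List.idxOf_append_of_mem hc]
      have hp' : PySem.Set.ofList (p ++ [c]) = D := by
        rw [ofList_append_singleton, if_pos hc]
      have := ih (p ++ [c]) (t * baseOf cs + dv cs c) (by rw [List.append_assoc]; exact hcs)
      rw [hp'] at this
      rw [hsd, hget]
      exact this
    · -- fresh symbol: dict extended, value is the scheduled digit at index |D|
      have hcont : (dictOf D).contains c = false := by
        rw [PySem.Dict.contains_eq_decide_mem_keys, hkeys]; simpa using hc
      have hdflt : PySem.List.pyGetD (schedListOf cs) ((dictOf D).size : Int) 0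
          = schedVal (D.length : Int) := by
        rw [hsize]; exact schedList_getD cs D.length hlen
      have hsd : (dictOf D).setdefault c (PySem.List.pyGetD (schedListOf cs) ((dictOf D).size : Int) 0)
          = dictOf (PySem.Set.ofList (p ++ [c])) := by
        rw [ofList_append_singleton, if_neg hc, dictOf_append_singleton, hdflt]
        apply PySem.Dict.ext
        simp [PySem.Dict.setdefault, PySem.Dict.items_insert, hcont, ← hDdef]
      have ht1 : ∃ t1, PySem.Set.ofList cs = (D ++ [c]) ++ t1 := by
        obtain ⟨t1, h1⟩ := ofList_append_exists (p ++ [c]) rest'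
        rw [List.append_assoc] at h1
        simp only [List.singleton_append] at h1
        rw [hcs] at h1
        refine ⟨t1, ?_⟩
        rw [h1, ofList_append_singleton, if_neg hc]
      obtain ⟨t1, h1⟩ := ht1
      have hidx : List.idxOf c (PySem.Set.ofList cs) = D.length := by
        rw [h1, List.append_assoc, List.idxOf_append_of_notMem hc]
        simp
      have hget : (dictOf D).getD c (PySem.List.pyGetD (schedListOf cs) ((dictOf D).size : Int) 0)
          = dv cs c := by
        rw [PySem.Dict.getD_of_not_contains _ _ hcont, hdflt]
        unfold dv
        rw [hidx]
      have := ih (p ++ [c]) (t * baseOf cs + dv cs c) (by rw [List.append_assoc]; exact hcs)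
      rw [hsd, hget]
      exact this

theorem solve_eq (message : String) : solve message = solve_alt message := by
  simp only [solve, solve_alt, PySem.List.dedup_eq_ofList]
  set cs := message.toList with hcs
  have hA :
      (cs.foldl
        (fun (st : PySem.Dict Char Int × Int) s =>
          (st.1.setdefault s (PySem.List.pyGetD (schedListOf cs) (st.1.size : Int) 0),
           st.2 * baseOf cs + st.1.getD s (PySem.List.pyGetD (schedListOf cs) (st.1.size : Int) 0)))
        (dictOf (PySem.Set.ofList []), 0)).2
      = cs.foldl (fun acc c => acc * baseOf cs + dv cs c) 0 :=
    A_loop cs cs [] 0 rfl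
  have hnodup := PySem.Set.nodup_ofList cs
  have hcongr :
      cs.reverse.foldl
        (fun (st : Int × Int) s => (st.1 + (dictOf (PySem.Set.ofList cs)).getD s 0 * st.2, st.2 * baseOf cs)) (0, 1)
      = cs.reverse.foldl (fun (st : Int × Int) s => (st.1 + dv cs s * st.2, st.2 * baseOf cs)) (0, 1) := by
    apply PySem.List.foldl_congr_mem
    intro acc s hs
    have hmem : s ∈ cs := List.mem_reverse.mp hs
    rw [getD_dictOf _ hnodup _ (by rw [PySem.Set.mem_ofList]; exact hmem)]
    rfl
  calc (cs.foldl
        (fun (st : PySem.Dict Char Int × Int) s =>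
          (st.1.setdefault s (PySem.List.pyGetD (schedListOf cs) (st.1.size : Int) 0),
           st.2 * baseOf cs + st.1.getD s (PySem.List.pyGetD (schedListOf cs) (st.1.size : Int) 0)))
        (PySem.Dict.empty, 0)).2
      = cs.foldl (fun acc c => acc * baseOf cs + dv cs c) 0 := hA
    _ = cs.reverse.foldr (fun c v => dv cs c + v * baseOf cs) 0 := horner_eq_rev (dv cs) (baseOf cs) cs
    _ = (cs.reverse.foldl
          (fun (st : Int × Int) s => (st.1 + dv cs s * st.2, st.2 * baseOf cs)) (0, 1)).1 := by
        rw [rev_loop (dv cs) (baseOf cs) cs.reverse 0 1]; ring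
    _ = (cs.reverse.foldl
          (fun (st : Int × Int) s => (st.1 + (dictOf (PySem.Set.ofList cs)).getD s 0 * st.2, st.2 * baseOf cs)) (0, 1)).1 := by
        rw [hcongr]

-- ===== VERDICT (by name: the statement is the Claim_ definition above) =====
theorem solve_spec : Claim_equal_solve := by
  intro message _
  exact solve_eq message
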